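-- pv_equiv track=rewrite | github.com/jasonjiang8866/algorithm_design | replace_digit_iterative.py | replace_digit
-- ===== SOURCE A (Python) =====
-- def replace_digit(n, d, r):
--     num_digit=count_digit(n)
--     result=0
--     for i in range(num_digit)[::-1]:
--         current_digit=n//10**i
--         if current_digit!=d:
--             result+=current_digit*10**i
--         else:
--             result+=r*10**i
--         n%=10**i
--     return result
--
-- def count_digit(x):
--     counter=0
--     while x>0:
--         x//=10
--         counter+=1
--     return counter
-- ===== SOURCE B (Python) =====
-- def replace_digit(n, d, r):
--     result = 0
--     power = 1
--     while n > 0: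
--         digit = n % 10
--         result += (r if digit == d else digit) * power
--         n //= 10
--         power *= 10
--     return result
-- ===== Notes on version B (the rewrite author's own statement) =====
-- stated objective: simpler
-- what changed: Single least-significant-first while loop with a running power accumulator, removing the up-front count_digit pass and the repeated 10**i recomputations of A's most-significant-first loop.
import Mathlib
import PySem

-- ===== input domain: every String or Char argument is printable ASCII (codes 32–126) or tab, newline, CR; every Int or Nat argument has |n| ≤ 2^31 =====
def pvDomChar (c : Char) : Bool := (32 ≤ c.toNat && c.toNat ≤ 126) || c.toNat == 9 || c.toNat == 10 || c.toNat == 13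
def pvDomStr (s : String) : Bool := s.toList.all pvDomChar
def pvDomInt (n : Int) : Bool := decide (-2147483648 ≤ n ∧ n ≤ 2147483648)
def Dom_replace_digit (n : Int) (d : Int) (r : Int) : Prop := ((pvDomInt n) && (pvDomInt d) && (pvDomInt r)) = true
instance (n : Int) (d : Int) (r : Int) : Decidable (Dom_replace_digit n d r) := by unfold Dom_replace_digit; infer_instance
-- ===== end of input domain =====

-- B replaces A's count-digits pass + most-significant-first loop (recomputing 10**i each step)
-- by a single least-significant-first loop with a running power accumulator; objective: simpler.


-- ===== PORT A =====
-- while x > 0: x //= 10; counter += 1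
def count_digit (x : Int) : Int :=
  if h : 0 < x then count_digit (PySem.Int.floordiv x 10) + 1 else 0
termination_by x.toNat
decreasing_by
  have h10 : PySem.Int.floordiv x 10 = x / 10 := PySem.Int.floordiv_eq_ediv_of_pos (by omega)
  rw [h10]; omega

-- for i in range(num_digit)[::-1]: …  (range(k)[::-1] is the reversed range list;
-- i is a nonnegative range element, so 10**i is ported as 10 ^ i.toNat)
def replace_digit (n : Int) (d : Int) (r : Int) : Int :=
  (((PySem.List.pyRange 0 (count_digit n) 1).reverse).foldl
      (fun (st : Int × Int) (i : Int) =>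
        let current_digit := PySem.Int.floordiv st.2 (10 ^ i.toNat)
        let result :=
          if current_digit ≠ d then st.1 + current_digit * 10 ^ i.toNat
          else st.1 + r * 10 ^ i.toNat
        (result, PySem.Int.mod st.2 (10 ^ i.toNat)))
      (0, n)).1

-- ===== PORT B =====
-- while n > 0: digit = n % 10; result += (r if digit == d else digit) * power; n //= 10; power *= 10
def altLoop (m power result d r : Int) : Int :=
  if h : 0 < m then
    let digit := PySem.Int.mod m 10
    altLoop (PySem.Int.floordiv m 10) (power * 10)
      (result + (if digit = d then r else digit) * power) d r
  else result
termination_by m.toNat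
decreasing_by
  have h10 : PySem.Int.floordiv m 10 = m / 10 := PySem.Int.floordiv_eq_ediv_of_pos (by omega)
  rw [h10]; omega

def replace_digit_alt (n : Int) (d : Int) (r : Int) : Int := altLoop n 1 0 d r

-- ===== PRECONDITION & SPEC =====
def Spec_replace_digit (n : Int) (d : Int) (r : Int) (out : Int) : Prop := out = replace_digit_alt n d r
instance (n : Int) (d : Int) (r : Int) (out : Int) : Decidable (Spec_replace_digit n d r out) := by unfold Spec_replace_digit; infer_instance

-- ===== CLAIM (what is proved, stated in full; the proofs are below) =====
def Claim_equal_replace_digit : Prop := ∀ (n : Int) (d : Int) (r : Int), Dom_replace_digit n d r → Spec_replace_digit n d r (replace_digit n d r)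

-- ===== LEMMAS AND PROOFS =====

-- the k least-significant digits of m, each replaced (d ↦ r), recombined
def hk (d r : Int) : Nat → Int → Int
  | 0, _ => 0
  | k + 1, m => (if m % 10 = d then r else m % 10) + 10 * hk d r k (m / 10)

theorem count_digit_nonneg (x : Int) : 0 ≤ count_digit x := by
  induction x using count_digit.induct with
  | case1 x h ih => rw [count_digit, dif_pos h]; omega
  | case2 x h => rw [count_digit, dif_neg h]

theorem count_digit_bound (x : Int) : x < 10 ^ (count_digit x).toNat := by
  induction x using count_digit.induct with
  | case1 x h ih =>
    rw [count_digit, dif_pos h]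
    have h10 : PySem.Int.floordiv x 10 = x / 10 := PySem.Int.floordiv_eq_ediv_of_pos (by omega)
    rw [h10] at ih
    have hn : 0 ≤ count_digit (PySem.Int.floordiv x 10) := count_digit_nonneg _
    have ht : (count_digit (PySem.Int.floordiv x 10) + 1).toNat
        = (count_digit (PySem.Int.floordiv x 10)).toNat + 1 := by omega
    rw [ht, pow_succ, h10] at *
    set p : Int := 10 ^ (count_digit (x / 10)).toNat with hp
    have hp0 : 0 < p := by positivity
    rw [h10] at ih
    omega
  | case2 x h => rw [count_digit, dif_neg h]; simp only [Int.toNat_zero, pow_zero]; omega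

theorem altLoop_eq (m power result d r : Int) :
    altLoop m power result d r = result + power * hk d r (count_digit m).toNat m := by
  induction m, power, result using altLoop.induct (d := d) (r := r) with
  | case1 m power result h digit ih =>
    have hdig : digit = PySem.Int.mod m 10 := rfl
    simp only [dite_eq_ite, hdig] at ih
    rw [altLoop, dif_pos h, count_digit, dif_pos h]
    show altLoop (PySem.Int.floordiv m 10) (power * 10)
        (result + (if PySem.Int.mod m 10 = d then r else PySem.Int.mod m 10) * power) d r = _
    have h10 : PySem.Int.floordiv m 10 = m / 10 := PySem.Int.floordiv_eq_ediv_of_pos (by omega)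
    have hm10 : PySem.Int.mod m 10 = m % 10 := PySem.Int.mod_eq_emod_of_pos (by omega)
    have hn : 0 ≤ count_digit (PySem.Int.floordiv m 10) := count_digit_nonneg _
    have ht : (count_digit (PySem.Int.floordiv m 10) + 1).toNat
        = (count_digit (PySem.Int.floordiv m 10)).toNat + 1 := by omega
    rw [ht, ih, hk, h10, hm10]
    ring
  | case2 m power result h =>
    rw [altLoop, dif_neg h, count_digit, dif_neg h]
    simp [hk]

theorem pyRange_cast (k : Nat) :
    PySem.List.pyRange 0 (k : Int) 1 = List.map (fun i : Nat => (i : Int)) (List.range k) := by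
  rw [PySem.List.pyRange_one]
  simp

-- stripping the most significant of k+1 digits
theorem hk_strip (d r : Int) : ∀ (k : Nat) (m : Int), 0 ≤ m → m < 10 ^ (k + 1) →
    hk d r (k + 1) m = hk d r k (m % 10 ^ k) + (if m / 10 ^ k = d then r else m / 10 ^ k) * 10 ^ k := by
  intro k
  induction k with
  | zero =>
    intro m h0 h1
    have : m % 10 = m := by omega
    simp [hk, this]
  | succ k ih =>
    intro m h0 h1
    have hq : (0:Int) < 10 ^ (k + 1) := by positivity
    have hqk : (0:Int) < 10 ^ k := by positivity
    have hb : m / 10 < 10 ^ (k + 1) := by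
      rw [pow_succ'] at h1; omega
    have h0' : 0 ≤ m / 10 := by omega
    rw [hk, ih (m / 10) h0' hb, hk]
    set s : Int := m % 10 ^ (k + 1) with hs
    set t : Int := m / 10 ^ (k + 1) with htd
    have hst : m = s + 10 * (10 ^ k * t) := by
      have := Int.emod_add_ediv m (10 ^ (k + 1))
      rw [← hs, ← htd] at this
      rw [← this, pow_succ']; ring
    have hs0 : 0 ≤ s := Int.emod_nonneg m (by positivity)
    have hs1 : s < 10 ^ (k + 1) := Int.emod_lt_of_pos m hq
    have e1 : s % 10 = m % 10 :=
      Int.emod_emod_of_dvd m ⟨10 ^ k, by rw [pow_succ]; ring⟩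
    have hm10 : m / 10 = s / 10 + 10 ^ k * t := by
      conv_lhs => rw [hst]
      rw [Int.add_mul_ediv_left _ _ (by norm_num : (10:Int) ≠ 0)]
    have hs10 : 0 ≤ s / 10 ∧ s / 10 < 10 ^ k := by
      rw [pow_succ'] at hs1; omega
    have e2 : s / 10 = m / 10 % 10 ^ k := by
      rw [hm10, Int.add_mul_emod_self_left, Int.emod_eq_of_lt hs10.1 hs10.2]
    have e3 : m / 10 / 10 ^ k = m / 10 ^ (k + 1) := by
      rw [Int.ediv_ediv_of_nonneg (by norm_num : (0:Int) ≤ 10), ← pow_succ']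
    rw [e1, e2, e3]
    ring

-- A's reversed-range fold computes hk of the digit count
theorem foldA_eq (d r : Int) : ∀ (k : Nat) (m res : Int), 0 ≤ m → m < 10 ^ k →
    ((List.map (fun i : Nat => (i : Int)) (List.range k)).reverse).foldl
      (fun (st : Int × Int) (i : Int) =>
        let current_digit := PySem.Int.floordiv st.2 (10 ^ i.toNat)
        let result :=
          if current_digit ≠ d then st.1 + current_digit * 10 ^ i.toNat
          else st.1 + r * 10 ^ i.toNat
        (result, PySem.Int.mod st.2 (10 ^ i.toNat)))
      (res, m)
    = (res + hk d r k m, m % 10 ^ 0) := by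
  intro k
  induction k with
  | zero => intro m res h0 h1; simp [hk]; omega
  | succ k ih =>
    intro m res h0 h1
    rw [List.range_succ, List.map_append, List.reverse_append]
    simp only [List.map_cons, List.map_nil, List.reverse_cons, List.reverse_nil,
      List.nil_append, List.cons_append, List.foldl_cons]
    have hk0 : (0:Int) < 10 ^ k := by positivity
    have htn : ((k : Int)).toNat = k := by omega
    have hfd : PySem.Int.floordiv m (10 ^ k) = m / 10 ^ k := PySem.Int.floordiv_eq_ediv_of_pos hk0
    have hmd : PySem.Int.mod m (10 ^ k) = m % 10 ^ k := PySem.Int.mod_eq_emod_of_pos hk0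
    have hm0 : 0 ≤ m % 10 ^ k := Int.emod_nonneg m (by positivity)
    have hm1 : m % 10 ^ k < 10 ^ k := Int.emod_lt_of_pos m hk0
    simp only [htn, hfd, hmd]
    rw [ih (m % 10 ^ k) _ hm0 hm1]
    rw [hk_strip d r k m h0 h1]
    by_cases hc : m / 10 ^ k = d <;> simp [hc] <;> ring_nf

theorem replace_digit_eq_hk (n d r : Int) :
    replace_digit n d r = hk d r (count_digit n).toNat n := by
  unfold replace_digit
  have hcn : count_digit n = ((count_digit n).toNat : Int) := by
    have := count_digit_nonneg n; omega
  rw [hcn, pyRange_cast]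
  by_cases hn : 0 ≤ n
  · rw [foldA_eq d r _ n 0 hn (count_digit_bound n)]
    simp
    have hnn := count_digit_nonneg n
    congr 1
    omega
  · have hc : count_digit n = 0 := by rw [count_digit, dif_neg (by omega)]
    rw [hcn] at hc
    have : (count_digit n).toNat = 0 := by omega
    rw [this]
    simp [hk]

-- ===== VERDICT (by name: the statement is the Claim_ definition above) =====
theorem replace_digit_spec : Claim_equal_replace_digit := by
  intro n d r _
  unfold Spec_replace_digit replace_digit_alt
  rw [altLoop_eq, replace_digit_eq_hk]
  ring
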